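-- pv_equiv track=rewrite | github.com/kodream/AIPython | Day03/speialCharToSpace.py | cTos
-- ===== SOURCE A (Python) =====
-- def cTos(str0,punct):
--     """
--     cToc(str0,punct) -> list
--     return list that
--     """
--     str1=''
--     d={}
--
--     for  c in str0:
--         if c  not in punct:
--             str1+=c
--         else:
--             str1+=' '
--
--     for  word in str1.split():
--         d[word]=d.get(word,0)+1
--     return d
-- ===== SOURCE B (Python) =====
-- def cTos(str0, punct):
--     d = {}
--     buf = []
--     for c in str0:
--         if c in punct or c.isspace():
--             if buf:
--                 w = ''.join(buf)
--                 d[w] = d.get(w, 0) + 1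
--                 buf = []
--         else:
--             buf.append(c)
--     if buf:
--         w = ''.join(buf)
--         d[w] = d.get(w, 0) + 1
--     return d
-- ===== Notes on version B (the rewrite author's own statement) =====
-- stated objective: alternative
-- what changed: Single pass over str0 with a current-word buffer (a punctuation or whitespace character flushes the buffer into the counter dict), instead of first building a translated copy of the whole string and then splitting it.
import Mathlib
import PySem

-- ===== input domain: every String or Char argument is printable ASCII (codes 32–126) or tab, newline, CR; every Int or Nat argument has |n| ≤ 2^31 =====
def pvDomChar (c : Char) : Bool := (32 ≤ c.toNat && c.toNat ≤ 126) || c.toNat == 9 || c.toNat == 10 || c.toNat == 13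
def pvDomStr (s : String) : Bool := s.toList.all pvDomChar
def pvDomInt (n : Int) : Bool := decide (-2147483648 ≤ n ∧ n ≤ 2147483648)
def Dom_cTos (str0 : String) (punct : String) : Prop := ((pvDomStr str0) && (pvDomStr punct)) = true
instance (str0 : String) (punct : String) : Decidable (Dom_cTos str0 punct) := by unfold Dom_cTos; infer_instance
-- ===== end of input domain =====

-- B replaces A's build-translated-copy-then-split with a single buffered scan (alternative decomposition, same cost).


-- ===== PORT A =====
-- str1 += c / str1 += ' ' over str0, then count str1.split() into a dict.
def cTos (str0 : String) (punct : String) : List (String × Int) :=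
  let str1 : List Char := str0.toList.foldl
    (fun s c => if PySem.Chars.isIn [c] punct.toList = false then s ++ [c] else s ++ [' ']) []
  let d : PySem.Dict String Int := (PySem.Chars.split₀ str1).foldl
    (fun d w => d.insert (String.mk w) (d.getD (String.mk w) 0 + 1)) PySem.Dict.empty
  d.items

-- ===== PORT B =====
-- flush the current-word buffer into the counter dict (no-op on an empty buffer)
def cTosAltFlush (d : PySem.Dict String Int) (buf : List Char) : PySem.Dict String Int :=
  if buf.isEmpty then d else d.insert (String.mk buf) (d.getD (String.mk buf) 0 + 1)

-- single pass: separator (in punct, or whitespace) flushes the buffer, otherwise extend it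
def cTosAltGo (punct : List Char) : List Char → PySem.Dict String Int → List Char → PySem.Dict String Int
  | [], d, buf => cTosAltFlush d buf
  | c :: rest, d, buf =>
    if PySem.Chars.isIn [c] punct || PySem.Chars.isspace c then
      cTosAltGo punct rest (cTosAltFlush d buf) []
    else
      cTosAltGo punct rest d (buf ++ [c])

def cTos_alt (str0 : String) (punct : String) : List (String × Int) :=
  (cTosAltGo punct.toList str0.toList PySem.Dict.empty []).items

-- ===== PRECONDITION & SPEC =====
def Spec_cTos (str0 : String) (punct : String) (out : List (String × Int)) : Prop := out = cTos_alt str0 punct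
instance (str0 : String) (punct : String) (out : List (String × Int)) : Decidable (Spec_cTos str0 punct out) := by unfold Spec_cTos; infer_instance

-- ===== CLAIM (what is proved, stated in full; the proofs are below) =====
def Claim_equal_cTos : Prop := ∀ (str0 : String) (punct : String), Dom_cTos str0 punct → Spec_cTos str0 punct (cTos str0 punct)

-- ===== LEMMAS AND PROOFS =====

-- A's per-character replacement
def pvRepl (punct : List Char) (c : Char) : Char :=
  if PySem.Chars.isIn [c] punct = false then c else ' '

-- the counting step both programs perform on a finished word
def pvStep (d : PySem.Dict String Int) (w : List Char) : PySem.Dict String Int :=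
  d.insert (String.mk w) (d.getD (String.mk w) 0 + 1)

-- unfolding equations (definitional)
theorem pvGoNil (cur : List Char) (acc : List (List Char)) :
    PySem.Chars.split₀.go [] cur acc
      = (if cur.isEmpty then acc.reverse else (cur.reverse :: acc).reverse) := rfl

theorem pvGoCons (c : Char) (rest cur : List Char) (acc : List (List Char)) :
    PySem.Chars.split₀.go (c :: rest) cur acc
      = (if PySem.Chars.isspace c then
           (if cur.isEmpty then PySem.Chars.split₀.go rest [] acc
            else PySem.Chars.split₀.go rest [] (cur.reverse :: acc))
         else PySem.Chars.split₀.go rest (c :: cur) acc) := rfl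

theorem pvAltNil (punct : List Char) (d : PySem.Dict String Int) (buf : List Char) :
    cTosAltGo punct [] d buf = cTosAltFlush d buf := rfl

theorem pvAltCons (punct : List Char) (c : Char) (rest : List Char)
    (d : PySem.Dict String Int) (buf : List Char) :
    cTosAltGo punct (c :: rest) d buf
      = (if PySem.Chars.isIn [c] punct || PySem.Chars.isspace c then
           cTosAltGo punct rest (cTosAltFlush d buf) []
         else cTosAltGo punct rest d (buf ++ [c])) := rfl

theorem pvIsspace_repl (punct : List Char) (c : Char) :
    PySem.Chars.isspace (pvRepl punct c) = (PySem.Chars.isIn [c] punct || PySem.Chars.isspace c) := by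
  unfold pvRepl
  by_cases h : PySem.Chars.isIn [c] punct = false
  · simp [h]
  · simp only [h]
    simp_all
    decide

theorem pvSplitGo_acc (s : List Char) : ∀ (cur : List Char) (acc : List (List Char)),
    PySem.Chars.split₀.go s cur acc = acc.reverse ++ PySem.Chars.split₀.go s cur [] := by
  induction s with
  | nil => intro cur acc; rw [pvGoNil, pvGoNil]; split_ifs <;> simp
  | cons c rest ih =>
    intro cur acc
    rw [pvGoCons, pvGoCons]
    by_cases hs : PySem.Chars.isspace c = true
    · by_cases hc : cur.isEmpty = true
      · simp only [hs, hc, if_true]; exact ih [] acc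
      · simp only [hs, hc, if_true, Bool.false_eq_true, if_false]
        rw [ih [] (cur.reverse :: acc), ih [] [cur.reverse]]
        simp
    · simp only [hs, Bool.false_eq_true, if_false]
      exact ih (c :: cur) acc

theorem pvMain (punct : List Char) (s : List Char) : ∀ (buf : List Char) (d : PySem.Dict String Int),
    (PySem.Chars.split₀.go (s.map (pvRepl punct)) buf.reverse []).foldl pvStep d
      = cTosAltGo punct s d buf := by
  induction s with
  | nil =>
    intro buf d
    rw [List.map_nil, pvGoNil, pvAltNil]
    unfold cTosAltFlush
    by_cases hb : buf.isEmpty = true <;> simp [hb, pvStep]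
  | cons c rest ih =>
    intro buf d
    rw [List.map_cons, pvGoCons, pvIsspace_repl, pvAltCons]
    by_cases hsep : (PySem.Chars.isIn [c] punct || PySem.Chars.isspace c) = true
    · by_cases hb : buf.isEmpty = true
      · have hb' : buf = [] := List.isEmpty_iff.mp hb
        subst hb'
        simp only [hsep, if_true, List.reverse_nil, List.isEmpty_nil]
        have h := ih [] d
        simp only [List.reverse_nil] at h
        exact h
      · have hbr : buf.reverse.isEmpty = false := by
          simp only [List.isEmpty_eq_false_iff] at *
          simp_all
        simp only [hsep, if_true, hbr, Bool.false_eq_true, if_false, List.reverse_reverse]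
        rw [pvSplitGo_acc _ [] [buf]]
        simp only [List.reverse_cons, List.reverse_nil, List.nil_append, List.foldl_append,
          List.foldl_cons, List.foldl_nil]
        have h := ih [] (pvStep d buf)
        simp only [List.reverse_nil] at h
        rw [h]
        have hflush : cTosAltFlush d buf = pvStep d buf := by
          unfold cTosAltFlush pvStep; simp [hb]
        rw [hflush]
    · have h1 : PySem.Chars.isIn [c] punct = false := by simp at hsep; exact hsep.1
      have h3 : PySem.Chars.isspace c = false := by simp at hsep; exact hsep.2
      have h2 : pvRepl punct c = c := by unfold pvRepl; simp [h1]
      rw [h2]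
      simp only [h1, h3, Bool.or_self, Bool.false_eq_true, if_false]
      rw [show c :: buf.reverse = (buf ++ [c]).reverse by simp]
      exact ih (buf ++ [c]) d

theorem pvStr1_eq (punct : List Char) (s : List Char) :
    s.foldl (fun acc c => if PySem.Chars.isIn [c] punct = false then acc ++ [c] else acc ++ [' ']) []
      = s.map (pvRepl punct) := by
  have h : (fun (acc : List Char) (c : Char) =>
      if PySem.Chars.isIn [c] punct = false then acc ++ [c] else acc ++ [' '])
      = fun acc c => acc ++ [pvRepl punct c] := by
    funext acc c; unfold pvRepl; split_ifs <;> rfl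
  rw [h, PySem.List.foldl_append_singleton_eq_map]
  simp

-- ===== VERDICT (by name: the statement is the Claim_ definition above) =====
theorem cTos_spec : Claim_equal_cTos := by
  intro str0 punct _
  unfold Spec_cTos cTos cTos_alt
  rw [pvStr1_eq]
  have h := pvMain punct.toList str0.toList [] PySem.Dict.empty
  simp only [List.reverse_nil] at h
  unfold PySem.Chars.split₀
  show (List.foldl pvStep PySem.Dict.empty
      (PySem.Chars.split₀.go (List.map (pvRepl punct.toList) str0.toList) [] [])).items
    = (cTosAltGo punct.toList str0.toList PySem.Dict.empty []).items
  rw [h]
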